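-- pv_equiv track=rewrite | github.com/ihgazni2/dlixhict-didactic | xdict/elist.py | remove_seqsnot
-- ===== SOURCE A (Python) =====
-- import copy
--
-- def remove_seqsnot(ol,value,seqs,**kwargs):
--     '''
--         from xdict.elist import *
--         ol = [1,'a',3,'a',5,'a',6,'a']
--         id(ol)
--         new = remove_seqsnot(ol,'a',{1,3})
--         ol
--         new
--         id(ol)
--         id(new)
--         ####
--         ol = [1,'a',3,'a',5,'a',6,'a']
--         id(ol)
--         rslt = remove_seqsnot(ol,'a',{1,3},mode="original")
--         ol
--         rslt
--         id(ol)
--         id(rslt)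
--     '''
--     if('mode' in kwargs):
--         mode = kwargs["mode"]
--     else:
--         mode = "new"
--     seqs = list(seqs)
--     new = []
--     length = ol.__len__()
--     cpol = copy.deepcopy(ol)
--     seq = -1
--     for i in range(0,length):
--         if(not(cpol[i]==value)):
--             seq = seq + 1
--             if(seq in seqs):
--                 pass
--             else:
--                 new.append(cpol[i])
--         else:
--             new.append(cpol[i])
--     if(mode == "new"):
--         return(new)
--     else:
--         ol.clear()
--         ol.extend(new)
--         return(ol)
-- ===== SOURCE B (Python) =====
-- import copy
--
-- def remove_seqsnot(ol, value, seqs, **kwargs):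
--     mode = kwargs.get("mode", "new")
--     cpol = copy.deepcopy(ol)
--     positions = [i for i, x in enumerate(cpol) if x != value]
--     remove = {positions[s] for s in seqs if 0 <= s < len(positions)}
--     new = [x for i, x in enumerate(cpol) if i not in remove]
--     if mode == "new":
--         return new
--     ol.clear()
--     ol.extend(new)
--     return ol
-- ===== Notes on version B (the rewrite author's own statement) =====
-- stated objective: alternative
-- what changed: A makes one stateful pass with a running occurrence counter deciding element by element; B first builds the table of positions of non-value elements, maps the occurrence indices in seqs through it into a set of list positions, and then filters the list by position membership.
import Mathlib
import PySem

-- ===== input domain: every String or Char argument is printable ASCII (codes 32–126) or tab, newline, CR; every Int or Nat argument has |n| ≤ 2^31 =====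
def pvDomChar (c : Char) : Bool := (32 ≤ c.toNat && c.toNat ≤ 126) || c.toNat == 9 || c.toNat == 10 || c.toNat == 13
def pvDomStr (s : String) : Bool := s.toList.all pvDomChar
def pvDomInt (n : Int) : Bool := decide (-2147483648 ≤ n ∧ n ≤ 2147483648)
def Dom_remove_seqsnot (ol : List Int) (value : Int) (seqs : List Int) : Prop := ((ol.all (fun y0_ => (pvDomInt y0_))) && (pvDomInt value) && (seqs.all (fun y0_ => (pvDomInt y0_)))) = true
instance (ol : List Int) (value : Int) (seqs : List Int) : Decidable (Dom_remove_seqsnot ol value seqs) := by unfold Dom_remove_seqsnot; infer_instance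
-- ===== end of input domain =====

-- B replaces A's single stateful counter pass by a two-phase position-table construction
-- (positions of non-value elements, a remove-set of list positions, then a filter); same cost,
-- alternative decomposition. Equivalence is about the returned list (with mode="original" the
-- Python A mutates ol in place; the default mode "new" is ported here).

-- ===== PORT A =====
def remove_seqsnot (ol : List Int) (value : Int) (seqs : List Int) : List Int :=
  -- mode = "new" (no kwargs in the ported signature); seqs = list(seqs) is already a list
  let length : Int := ol.length
  let cpol := ol
  -- for i in range(0, length): with state (seq, new), seq starting at -1
  let st :=
    (PySem.List.pyRange 0 length 1).foldl
      (fun (st : Int × List Int) (i : Int) =>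
        if !(PySem.List.pyGetD cpol i 0 == value) then
          let seq := st.1 + 1
          if seqs.contains seq then (seq, st.2)
          else (seq, st.2 ++ [PySem.List.pyGetD cpol i 0])
        else (st.1, st.2 ++ [PySem.List.pyGetD cpol i 0]))
      ((-1 : Int), ([] : List Int))
  st.2

-- ===== PORT B =====
def remove_seqsnot_alt (ol : List Int) (value : Int) (seqs : List Int) : List Int :=
  let cpol := ol
  -- positions = [i for i, x in enumerate(cpol) if x != value]
  let positions : List Int :=
    ((PySem.List.enumerate cpol 0).filter (fun p => !(p.2 == value))).map (fun p => p.1)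
  -- remove = {positions[s] for s in seqs if 0 <= s < len(positions)}
  let remove : PySem.Set Int :=
    seqs.foldl
      (fun acc s =>
        if 0 ≤ s ∧ s < (positions.length : Int) then
          PySem.Set.add acc (PySem.List.pyGetD positions s 0)
        else acc)
      PySem.Set.empty
  -- new = [x for i, x in enumerate(cpol) if i not in remove]
  ((PySem.List.enumerate cpol 0).filter (fun p => !(PySem.Set.contains remove p.1))).map (fun p => p.2)

-- ===== PRECONDITION & SPEC =====
def Spec_remove_seqsnot (ol : List Int) (value : Int) (seqs : List Int) (out : List Int) : Prop := out = remove_seqsnot_alt ol value seqs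
instance (ol : List Int) (value : Int) (seqs : List Int) (out : List Int) : Decidable (Spec_remove_seqsnot ol value seqs out) := by unfold Spec_remove_seqsnot; infer_instance

-- ===== CLAIM (what is proved, stated in full; the proofs are below) =====
def Claim_equal_remove_seqsnot : Prop := ∀ (ol : List Int) (value : Int) (seqs : List Int), Dom_remove_seqsnot ol value seqs → Spec_remove_seqsnot ol value seqs (remove_seqsnot ol value seqs)

-- ===== LEMMAS AND PROOFS =====

-- Common reference recursion: keep x if x = value, otherwise keep it iff its occurrence
-- counter c is not in seqs (counter increments on non-value elements).
def gRec (value : Int) (seqs : List Int) : List Int → Int → List Int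
  | [], _ => []
  | x :: xs, c =>
    if x == value then x :: gRec value seqs xs c
    else if seqs.contains c then gRec value seqs xs (c + 1)
    else x :: gRec value seqs xs (c + 1)

-- A's loop body as a function of the current element.
def stepA (value : Int) (seqs : List Int) (st : Int × List Int) (x : Int) : Int × List Int :=
  if !(x == value) then
    let seq := st.1 + 1
    if seqs.contains seq then (seq, st.2)
    else (seq, st.2 ++ [x])
  else (st.1, st.2 ++ [x])

theorem foldA (value : Int) (seqs : List Int) :
    ∀ (l : List Int) (c : Int) (acc : List Int),
      (l.foldl (stepA value seqs) (c, acc)).2 = acc ++ gRec value seqs l (c + 1) := by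
  intro l
  induction l with
  | nil => intro c acc; simp [gRec]
  | cons x xs ih =>
    intro c acc
    by_cases hx : x == value
    · simp [stepA, hx, gRec, ih]
    · by_cases hs : (c + 1) ∈ seqs
      · simp [stepA, hx, hs, gRec, ih]
      · simp [stepA, hx, hs, gRec, ih]

theorem aEq (ol : List Int) (value : Int) (seqs : List Int) :
    remove_seqsnot ol value seqs = gRec value seqs ol 0 := by
  show (List.foldl (fun st i => stepA value seqs st (PySem.List.pyGetD ol i 0)) ((-1 : Int), ([] : List Int)) (PySem.List.pyRange 0 (ol.length : Int) 1)).2 = gRec value seqs ol 0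
  rw [PySem.List.foldl_pyRange_zero_pyGetD' ol 0 (stepA value seqs) ((-1 : Int), ([] : List Int))]
  rw [foldA]
  norm_num

def posRec (value : Int) : List Int → Int → List Int
  | [], _ => []
  | x :: xs, i => if x == value then posRec value xs (i + 1) else i :: posRec value xs (i + 1)

theorem posB (value : Int) :
    ∀ (l : List Int) (s : Int),
      ((PySem.List.enumerate l s).filter (fun p => !(p.2 == value))).map (fun p => p.1)
        = posRec value l s := by
  intro l
  induction l with
  | nil => intro s; simp [PySem.List.enumerate_nil, posRec]
  | cons x xs ih =>
    intro s
    by_cases hx : x == value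
    · simp [PySem.List.enumerate_cons, hx, posRec, ih]
    · simp [PySem.List.enumerate_cons, hx, posRec, ih]

-- POS2: the occurrence index of a non-value element maps back to its position.
theorem pos_of_idx (value : Int) :
    ∀ (l : List Int) (i0 : Int) (k : Nat) (_ : k < l.length),
      !(l[k]?.getD 0 == value) = true →
      (posRec value l i0)[(l.take k).countP (fun y => !(y == value))]? = some (i0 + k) := by
  intro l
  induction l with
  | nil => intro i0 k hk; simp at hk
  | cons x xs ih =>
    intro i0 k hk hnv
    cases k with
    | zero =>
      simp at hnv
      simp [posRec, hnv]
    | succ k =>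
      simp at hk
      have hrec := ih (i0 + 1) k hk (by simpa using hnv)
      by_cases hx : x == value
      · simp only [List.take_succ_cons, List.countP_cons, posRec, if_pos hx]
        simp only [hx]
        simp only [if_neg (by simp : ¬ ((!true) = true))]
        rw [show i0 + ((k + 1 : Nat) : Int) = (i0 + 1) + (k : Int) by push_cast; ring]
        simpa using hrec
      · simp only [List.take_succ_cons, List.countP_cons, posRec, if_neg hx]
        have hxf : (x == value) = false := by simpa using hx
        simp only [hxf]
        simp only [if_pos (by simp : ((!false) = true))]
        rw [List.getElem?_cons_succ]
        rw [show i0 + ((k + 1 : Nat) : Int) = (i0 + 1) + (k : Int) by push_cast; ring]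
        exact hrec
  
-- POS1: every entry of posRec is the position of a non-value element whose occurrence count is the entry's index.
theorem idx_of_pos (value : Int) :
    ∀ (l : List Int) (i0 : Int) (s : Nat),
      s < (posRec value l i0).length →
      ∃ (k : Nat), k < l.length ∧ (posRec value l i0)[s]? = some (i0 + k) ∧
        !(l[k]?.getD 0 == value) = true ∧ (l.take k).countP (fun y => !(y == value)) = s := by
  intro l
  induction l with
  | nil => intro i0 s hs; simp [posRec] at hs
  | cons x xs ih =>
    intro i0 s hs
    by_cases hx : x == value
    · simp only [posRec, if_pos hx] at hs ⊢
      obtain ⟨k, hk, h1, h2, h3⟩ := ih (i0 + 1) s hs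
      refine ⟨k + 1, by simpa using hk, ?_, by simpa using h2, ?_⟩
      · rw [h1]; congr 1; push_cast; ring
      · simp [hx, h3]
    · simp only [posRec, if_neg hx] at hs ⊢
      cases s with
      | zero =>
        refine ⟨0, by simp, by simp, by simp [hx], by simp⟩
      | succ s =>
        simp at hs
        obtain ⟨k, hk, h1, h2, h3⟩ := ih (i0 + 1) s hs
        refine ⟨k + 1, by simpa using hk, ?_, by simpa using h2, ?_⟩
        · rw [List.getElem?_cons_succ, h1]; congr 1; push_cast; ring
        · have hxt : (!(x == value)) = true := by simp [hx]
          simp [hxt, h3]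

-- Membership in the fold-built remove set.
theorem mem_removeFold (positions : List Int) :
    ∀ (L : List Int) (acc : List Int) (i : Int),
      i ∈ L.foldl
        (fun acc s =>
          if 0 ≤ s ∧ s < (positions.length : Int) then
            PySem.Set.add acc (PySem.List.pyGetD positions s 0)
          else acc) acc
      ↔ i ∈ acc ∨ ∃ s ∈ L, (0 ≤ s ∧ s < (positions.length : Int)) ∧ PySem.List.pyGetD positions s 0 = i := by
  intro L
  induction L with
  | nil => intro acc i; simp
  | cons a L ih =>
    intro acc i
    by_cases ha : 0 ≤ a ∧ a < (positions.length : Int)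
    · simp only [List.foldl_cons, if_pos ha, ih, PySem.Set.mem_add]
      constructor
      · rintro (⟨h | h⟩ | h)
        · exact Or.inl h
        · exact Or.inr ⟨a, List.mem_cons_self .., ha, h.symm⟩
        · obtain ⟨s, hs, h1, h2⟩ := h
          exact Or.inr ⟨s, List.mem_cons_of_mem _ hs, h1, h2⟩
      · rintro (h | ⟨s, hs, h1, h2⟩)
        · exact Or.inl (Or.inl h)
        · rcases List.mem_cons.mp hs with rfl | hs
          · exact Or.inl (Or.inr h2.symm)
          · exact Or.inr ⟨s, hs, h1, h2⟩
    · simp only [List.foldl_cons, if_neg ha, ih]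
      constructor
      · rintro (h | ⟨s, hs, h1, h2⟩)
        · exact Or.inl h
        · exact Or.inr ⟨s, List.mem_cons_of_mem _ hs, h1, h2⟩
      · rintro (h | ⟨s, hs, h1, h2⟩)
        · exact Or.inl h
        · rcases List.mem_cons.mp hs with rfl | hs
          · exact absurd h1 ha
          · exact Or.inr ⟨s, hs, h1, h2⟩

-- Generic filter-by-index to gRec.
theorem filt (value : Int) (seqs : List Int) (keep : Int → Bool) :
    ∀ (l : List Int) (s c : Int),
      (∀ (k : Nat), k < l.length →
        keep (s + (k : Int)) = ((l[k]?.getD 0 == value) ||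
          !(seqs.contains (c + ((l.take k).countP (fun y => !(y == value)) : Int))))) →
      ((PySem.List.enumerate l s).filter (fun p => keep p.1)).map (fun p => p.2)
        = gRec value seqs l c := by
  intro l
  induction l with
  | nil => intro s c _; simp [PySem.List.enumerate_nil, gRec]
  | cons x xs ih =>
    intro s c h
    have h0 : keep s = ((x == value) || !(seqs.contains c)) := by
      have := h 0 (by simp)
      simpa using this
    have hshift := ih (s + 1)
    by_cases hx : x == value
    · have hk : keep s = true := by simp [h0, hx]
      have hxne : ¬ (!(x == value) = true) := by simp [hx]
      rw [PySem.List.enumerate_cons, List.filter_cons,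
        if_pos (show keep (s, x).1 = true from hk), List.map_cons]
      simp only [gRec, if_pos hx]
      congr 1
      apply hshift c
      intro k hkk
      have := h (k + 1) (by simpa using hkk)
      have harg : s + ((k + 1 : Nat) : Int) = (s + 1) + (k : Int) := by push_cast; ring
      rw [harg] at this
      rw [this]
      simp [show x = value from by simpa using hx]
    · have hxt : (!(x == value)) = true := by simp [hx]
      have hcnt : ∀ (k : Nat), ((x :: xs).take (k + 1)).countP (fun y => !(y == value))
          = (xs.take k).countP (fun y => !(y == value)) + 1 := by
        intro k; simp [hxt]
      by_cases hs : c ∈ seqs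
      · have hsc : seqs.contains c = true := by simpa using hs
        have hk : keep s = false := by simp [h0, hx, hs]
        rw [PySem.List.enumerate_cons, List.filter_cons,
          if_neg (show ¬ keep (s, x).1 = true by simp [hk])]
        simp only [gRec, if_neg hx, if_pos hsc]
        apply hshift (c + 1)
        intro k hkk
        have := h (k + 1) (by simpa using hkk)
        have harg : s + ((k + 1 : Nat) : Int) = (s + 1) + (k : Int) := by push_cast; ring
        rw [harg] at this
        rw [this, hcnt]
        have harith : c + (((xs.take k).countP (fun y => !(y == value)) : Int) + 1)
            = c + 1 + ((xs.take k).countP (fun y => !(y == value)) : Int) := by ring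
        push_cast
        rw [harith, List.getElem?_cons_succ]
      · have hsc : ¬ seqs.contains c = true := by simpa using hs
        have hk : keep s = true := by simp [h0, hx, hs]
        rw [PySem.List.enumerate_cons, List.filter_cons,
          if_pos (show keep (s, x).1 = true from hk), List.map_cons]
        simp only [gRec, if_neg hx, if_neg hsc]
        congr 1
        apply hshift (c + 1)
        intro k hkk
        have := h (k + 1) (by simpa using hkk)
        have harg : s + ((k + 1 : Nat) : Int) = (s + 1) + (k : Int) := by push_cast; ring
        rw [harg] at this
        rw [this, hcnt]
        have harith : c + (((xs.take k).countP (fun y => !(y == value)) : Int) + 1)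
            = c + 1 + ((xs.take k).countP (fun y => !(y == value)) : Int) := by ring
        push_cast
        rw [harith, List.getElem?_cons_succ]

-- Pointwise characterization of the remove set on valid indices.
theorem keep_char (ol : List Int) (value : Int) (seqs : List Int) (k : Nat) (hk : k < ol.length) :
    ((k : Int) ∈ seqs.foldl
        (fun acc s =>
          if 0 ≤ s ∧ s < ((posRec value ol 0).length : Int) then
            PySem.Set.add acc (PySem.List.pyGetD (posRec value ol 0) s 0)
          else acc) PySem.Set.empty)
    ↔ (!(ol[k]?.getD 0 == value) = true ∧ ((ol.take k).countP (fun y => !(y == value)) : Int) ∈ seqs) := by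
  rw [mem_removeFold]
  simp only [PySem.Set.empty, List.not_mem_nil, false_or]
  constructor
  · rintro ⟨s, hsmem, ⟨hs0, hslt⟩, hval⟩
    have hsn : s = ((s.toNat : Nat) : Int) := by omega
    have hlt : s.toNat < (posRec value ol 0).length := by omega
    rw [PySem.List.pyGetD_eq_getElem _ _ hs0 hslt] at hval
    obtain ⟨k', hk', h1, h2, h3⟩ := idx_of_pos value ol 0 s.toNat hlt
    have : (posRec value ol 0)[s.toNat]? = some ((k : Int)) := by
      rw [List.getElem?_eq_getElem hlt, hval]
    rw [h1] at this
    have hkk : (0 : Int) + (k' : Int) = (k : Int) := by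
      simpa using Option.some.inj this
    have hkeq : k' = k := by omega
    subst hkeq
    refine ⟨h2, ?_⟩
    have : ((ol.take k').countP (fun y => !(y == value)) : Int) = s := by omega
    rwa [this]
  · rintro ⟨hnv, hmem⟩
    set occ := (ol.take k).countP (fun y => !(y == value)) with hocc
    have hsome := pos_of_idx value ol 0 k hk hnv
    have hlen : occ < (posRec value ol 0).length := by
      by_contra hge
      rw [List.getElem?_eq_none (by omega)] at hsome
      simp at hsome
    refine ⟨(occ : Int), hmem, ⟨by omega, by exact_mod_cast hlen⟩, ?_⟩
    rw [PySem.List.pyGetD_eq_getElem _ _ (by omega) (by exact_mod_cast hlen)]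
    have : (posRec value ol 0)[(occ : Int).toNat]? = some ((k : Int)) := by
      simpa using hsome
    rw [List.getElem?_eq_getElem (by simpa using hlen)] at this
    simpa using Option.some.inj this

theorem altEq (ol : List Int) (value : Int) (seqs : List Int) :
    remove_seqsnot_alt ol value seqs = gRec value seqs ol 0 := by
  unfold remove_seqsnot_alt
  simp only [posB]
  set rm := seqs.foldl
      (fun acc s =>
        if 0 ≤ s ∧ s < ((posRec value ol 0).length : Int) then
          PySem.Set.add acc (PySem.List.pyGetD (posRec value ol 0) s 0)
        else acc) PySem.Set.empty with hrm
  apply filt value seqs (fun i => !(PySem.Set.contains rm i)) ol 0 0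
  intro k hkk
  have hchar := keep_char ol value seqs k hkk
  rw [← hrm] at hchar
  simp only [zero_add]
  by_cases hm : ((k : Int) ∈ rm)
  · obtain ⟨h1, h2⟩ := hchar.mp hm
    have hc : PySem.Set.contains rm ((k : Int)) = true := by
      rw [PySem.Set.contains_iff]; exact hm
    simp only [hc, Bool.not_true]
    have hv : (ol[k]?.getD 0 == value) = false := by simpa using h1
    rw [hv]
    simp [h2]
  · have hc : PySem.Set.contains rm ((k : Int)) = false := by
      rw [← Bool.not_eq_true, PySem.Set.contains_iff]; exact hm
    simp only [hc, Bool.not_false]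
    by_cases hv : (ol[k]?.getD 0 == value)
    · simp [hv]
    · have h2 : ¬ ((ol.take k).countP (fun y => !(y == value)) : Int) ∈ seqs := by
        intro hmem
        exact hm (hchar.mpr ⟨by simp [hv], hmem⟩)
      simp [hv, h2]

-- ===== VERDICT (by name: the statement is the Claim_ definition above) =====
theorem remove_seqsnot_spec : Claim_equal_remove_seqsnot := by
  intro ol value seqs _
  unfold Spec_remove_seqsnot
  rw [aEq, altEq]
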